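-- pv_equiv track=rewrite | github.com/0russwest0/android_env | android_env/wrappers/mobile_agent_action_wrapper.py | _adb_text_format
-- ===== SOURCE A (Python) =====
-- import unicodedata
--
-- def _adb_text_format(text: str) -> str:
--   """Prepares text for use with adb input text."""
--   to_escape = [
--       '\\',
--       ';',
--       '|',
--       '`',
--       '\r',
--       ' ',
--       "'",
--       '"',
--       '&',
--       '<',
--       '>',
--       '(',
--       ')',
--       '#',
--       '$',
--   ]
--   for char in to_escape:
--     text = text.replace(char, '\\' + char)
--   normalized_text = unicodedata.normalize('NFKD', text)
--   return normalized_text.encode('ascii', 'ignore').decode('ascii')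
-- ===== SOURCE B (Python) =====
-- import unicodedata
--
-- _TO_ESCAPE = '\\;|`\r \'"&<>()#$'
-- _TABLE = {ord(c): '\\' + c for c in _TO_ESCAPE}
--
-- def _adb_text_format(text: str) -> str:
--   """Prepares text for use with adb input text."""
--   text = text.translate(_TABLE)
--   normalized_text = unicodedata.normalize('NFKD', text)
--   return normalized_text.encode('ascii', 'ignore').decode('ascii')
-- ===== Notes on version B (the rewrite author's own statement) =====
-- stated objective: idiomatic
-- what changed: Replaced the 15 sequential str.replace passes with a single str.translate pass over a prebuilt table mapping each escape character to '\'+char; the NFKD-normalize and ascii-ignore tail is unchanged.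
import Mathlib
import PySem

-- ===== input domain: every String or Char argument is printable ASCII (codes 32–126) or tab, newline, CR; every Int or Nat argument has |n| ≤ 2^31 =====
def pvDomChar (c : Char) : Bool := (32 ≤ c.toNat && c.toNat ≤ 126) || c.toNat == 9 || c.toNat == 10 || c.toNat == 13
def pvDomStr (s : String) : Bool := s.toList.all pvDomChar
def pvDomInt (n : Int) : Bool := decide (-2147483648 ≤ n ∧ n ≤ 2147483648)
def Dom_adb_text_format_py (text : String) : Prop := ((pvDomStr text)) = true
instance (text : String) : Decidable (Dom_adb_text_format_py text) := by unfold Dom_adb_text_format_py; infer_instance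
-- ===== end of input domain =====

-- B replaces A's 15 sequential str.replace passes with one translate-table pass; proof: both are the same per-character escape map.


-- ===== PORT A =====
-- the to_escape list, in A's order
def pvEscListA : List Char := ['\\', ';', '|', '`', '\r', ' ', '\'', '"', '&', '<', '>', '(', ')', '#', '$']

-- unicodedata.normalize('NFKD', ·): hand port as the identity — exact on ASCII-only strings (all this file claims about)
def pvNfkd (cs : List Char) : List Char := cs

-- .encode('ascii','ignore').decode('ascii'): hand port, drops every codepoint above 127 — exact
def pvAsciiIgnore (cs : List Char) : List Char := cs.filter (fun c => c.toNat ≤ 127)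

def adb_text_format_py (text : String) : String :=
  let escaped := List.foldl (fun cs ch => PySem.Chars.replace cs [ch] ['\\', ch]) text.toList pvEscListA
  String.ofList (pvAsciiIgnore (pvNfkd escaped))

-- ===== PORT B =====
-- _TO_ESCAPE string and the translation table {ord(c): '\\'+c for c in _TO_ESCAPE}
def pvToEscapeB : List Char := "\\;|`\r '\"&<>()#$".toList
def pvTableB : PySem.Dict Char (List Char) :=
  PySem.Dict.ofList (pvToEscapeB.map (fun c => (c, ['\\', c])))

def adb_text_format_py_alt (text : String) : String :=
  -- text.translate(table): each char mapped through the table, unmapped chars kept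
  let escaped := text.toList.flatMap (fun c => (pvTableB.get? c).getD [c])
  String.ofList (pvAsciiIgnore (pvNfkd escaped))

-- ===== PRECONDITION & SPEC =====
def Spec_adb_text_format_py (text : String) (out : String) : Prop := out = adb_text_format_py_alt text
instance (text : String) (out : String) : Decidable (Spec_adb_text_format_py text out) := by unfold Spec_adb_text_format_py; infer_instance

-- ===== CLAIM (what is proved, stated in full; the proofs are below) =====
def Claim_equal_adb_text_format_py : Prop := ∀ (text : String), Dom_adb_text_format_py text → Spec_adb_text_format_py text (adb_text_format_py text)

-- ===== LEMMAS AND PROOFS =====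

-- a single-char replace is a pointwise flatMap
theorem pv_go_single (p : Char) (r : List Char) :
    ∀ (l : List Char) (fuel : Nat) (acc : List Char), l.length ≤ fuel →
      PySem.Chars.replace.go [p] r fuel l acc
        = acc.reverse ++ l.flatMap (fun x => if x = p then r else [x]) := by
  intro l
  induction l with
  | nil => intro fuel acc _; cases fuel <;> simp [PySem.Chars.replace.go]
  | cons c t ih =>
      intro fuel acc h
      cases fuel with
      | zero => simp at h
      | succ f =>
          by_cases hc : p = c
          · subst hc
            have hpre : List.isPrefixOf [p] (p :: t) = true := by simp [List.isPrefixOf]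
            simp only [PySem.Chars.replace.go, hpre, if_true, List.length_cons,
              List.length_nil, Nat.zero_add, List.drop_succ_cons, List.drop_zero]
            rw [ih _ _ (by simpa using h)]
            simp
          · have hcp : c ≠ p := fun hh => hc hh.symm
            have hpre : List.isPrefixOf [p] (c :: t) = false := by
              simp [List.isPrefixOf, hc]
            simp only [PySem.Chars.replace.go, hpre, if_false, Bool.false_eq_true]
            rw [ih _ _ (by simpa using Nat.le_of_succ_le_succ h)]
            simp [hcp]

theorem pv_replace_single (l : List Char) (p : Char) (r : List Char) :
    PySem.Chars.replace l [p] r = l.flatMap (fun x => if x = p then r else [x]) := by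
  rw [PySem.Chars.replace]
  have hne : ([p] : List Char).isEmpty = false := rfl
  rw [hne]
  simpa using pv_go_single p r l l.length [] le_rfl

def pvStage (ch : Char) (x : Char) : List Char := if x = ch then ['\\', ch] else [x]

-- the per-character function computed by the chain of stages
def pvG : List Char → Char → List Char
  | [], c => [c]
  | e :: E, c => (pvStage e c).flatMap (pvG E)

-- a fold of flatMaps is one flatMap of the composite per-char function
theorem pv_foldl_flatMap (E : List Char) :
    ∀ (l : List Char),
      List.foldl (fun cs ch => cs.flatMap (pvStage ch)) l E = l.flatMap (pvG E) := by
  induction E with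
  | nil => intro l; simp [pvG]
  | cons e E ih =>
      intro l
      simp only [List.foldl_cons]
      rw [ih, List.flatMap_assoc]
      rfl

-- the per-character result of A's 15 stages equals B's table lookup
theorem pv_pointwise (c : Char) :
    pvG pvEscListA c = (pvTableB.get? c).getD [c] := by
  by_cases h1 : c = '\\';  · subst h1; decide
  by_cases h2 : c = ';';   · subst h2; decide
  by_cases h3 : c = '|';   · subst h3; decide
  by_cases h4 : c = '`';   · subst h4; decide
  by_cases h5 : c = '\r';  · subst h5; decide
  by_cases h6 : c = ' ';   · subst h6; decide
  by_cases h7 : c = '\'';  · subst h7; decide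
  by_cases h8 : c = '"';   · subst h8; decide
  by_cases h9 : c = '&';   · subst h9; decide
  by_cases h10 : c = '<';  · subst h10; decide
  by_cases h11 : c = '>';  · subst h11; decide
  by_cases h12 : c = '(';  · subst h12; decide
  by_cases h13 : c = ')';  · subst h13; decide
  by_cases h14 : c = '#';  · subst h14; decide
  by_cases h15 : c = '$';  · subst h15; decide
  have ht : pvTableB = PySem.Dict.mk
      [('\\', ['\\', '\\']), (';', ['\\', ';']), ('|', ['\\', '|']), ('`', ['\\', '`']),
       ('\r', ['\\', '\r']), (' ', ['\\', ' ']), ('\'', ['\\', '\'']), ('"', ['\\', '"']),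
       ('&', ['\\', '&']), ('<', ['\\', '<']), ('>', ['\\', '>']), ('(', ['\\', '(']),
       (')', ['\\', ')']), ('#', ['\\', '#']), ('$', ['\\', '$'])] := by decide
  simp [pvEscListA, pvG, pvStage, ht, PySem.Dict.get?,
        h1, h2, h3, h4, h5, h6, h7, h8, h9, h10, h11, h12, h13, h14, h15,
        Ne.symm h1, Ne.symm h2, Ne.symm h3, Ne.symm h4, Ne.symm h5, Ne.symm h6,
        Ne.symm h7, Ne.symm h8, Ne.symm h9, Ne.symm h10, Ne.symm h11, Ne.symm h12,
        Ne.symm h13, Ne.symm h14, Ne.symm h15]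

-- ===== VERDICT (by name: the statement is the Claim_ definition above) =====
theorem adb_text_format_py_spec : Claim_equal_adb_text_format_py := by
  intro text _
  unfold Spec_adb_text_format_py adb_text_format_py adb_text_format_py_alt
  have : List.foldl (fun cs ch => PySem.Chars.replace cs [ch] ['\\', ch]) text.toList pvEscListA
      = text.toList.flatMap (fun c => (pvTableB.get? c).getD [c]) := by
    have hrepl : (fun (cs : List Char) (ch : Char) => PySem.Chars.replace cs [ch] ['\\', ch])
        = fun cs ch => cs.flatMap (pvStage ch) := by
      funext cs ch; rw [pv_replace_single]; rfl
    rw [hrepl, pv_foldl_flatMap]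
    exact List.flatMap_congr (fun c _ => pv_pointwise c)
  rw [this]
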